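-- pv_equiv track=rewrite | github.com/MrBrantCode/unitest_baseline | mut_generate/mist_train_cf/cf_16964/solution.py | separate_and_count
-- ===== SOURCE A (Python) =====
-- def separate_and_count(sentence):
--     """
--     Separate the words in a sentence and count the occurrences of each word.
--
--     Args:
--     sentence (str): The input sentence.
--
--     Returns:
--     dict: A dictionary where keys are the unique words in the sentence and values are their respective counts in descending order of frequency.
--     """
--
--     # Remove leading/trailing whitespaces and split the sentence into words
--     words = sentence.strip().split()
--
--     # Create a dictionary to store word counts
--     word_count = {}
--
--     # Iterate through each word and update its count
--     for word in words:
--         if word not in word_count: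
--             word_count[word] = 1
--         else:
--             word_count[word] += 1
--
--     # Sort the dictionary by values (counts) in descending order
--     sorted_count = dict(sorted(word_count.items(), key=lambda item: item[1], reverse=True))
--
--     return sorted_count
-- ===== SOURCE B (Python) =====
-- def separate_and_count(sentence):
--     # Count words in one insertion-ordered pass.
--     word_count = {}
--     for word in sentence.strip().split():
--         word_count[word] = word_count.get(word, 0) + 1
--
--     # Largest count (0 when there are no words).
--     maxc = 0
--     for c in word_count.values():
--         if c > maxc:
--             maxc = c
--
--     # Counting sort by frequency: bucket words by their count,
--     # in insertion order, then emit buckets from maxc down to 1.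
--     buckets = {}
--     for word, c in word_count.items():
--         buckets.setdefault(c, []).append(word)
--
--     result = {}
--     for c in range(maxc, 0, -1):
--         for word in buckets.get(c, []):
--             result[word] = c
--     return result
-- ===== Notes on version B (the rewrite author's own statement) =====
-- stated objective: alternative
-- what changed: Replaces the comparison sort of the count dict (sorted with key=item[1], reverse=True) by a counting sort: words are bucketed by their frequency in insertion order and the buckets are emitted from the maximal frequency down to 1.
import Mathlib
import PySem

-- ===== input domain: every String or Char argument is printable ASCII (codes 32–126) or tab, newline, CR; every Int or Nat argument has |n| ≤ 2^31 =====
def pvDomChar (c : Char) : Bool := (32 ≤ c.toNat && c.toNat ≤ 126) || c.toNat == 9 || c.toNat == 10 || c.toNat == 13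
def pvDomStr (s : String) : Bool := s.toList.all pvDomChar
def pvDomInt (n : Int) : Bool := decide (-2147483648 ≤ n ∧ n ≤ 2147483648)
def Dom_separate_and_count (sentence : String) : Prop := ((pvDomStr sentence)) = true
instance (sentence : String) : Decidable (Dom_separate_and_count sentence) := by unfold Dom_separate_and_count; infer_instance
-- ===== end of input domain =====

-- B replaces A's comparison sort of the count dict by a counting sort over frequency buckets
-- (same return value; an alternative algorithm, not claimed faster).

-- ===== PORT A =====
def separate_and_count (sentence : String) : List (String × Int) :=
  let words := PySem.Str.split₀ (PySem.Str.strip sentence)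
  let word_count := words.foldl
    (fun d word =>
      if ¬ d.contains word then d.insert word 1
      else d.insert word (d.getD word 0 + 1))
    PySem.Dict.empty
  let sorted_count :=
    PySem.Dict.ofList (PySem.List.sorted word_count.items (fun item => item.2) true)
  sorted_count.items

-- ===== PORT B =====
def separate_and_count_alt (sentence : String) : List (String × Int) :=
  let word_count := (PySem.Str.split₀ (PySem.Str.strip sentence)).foldl
    (fun d word => d.insert word (d.getD word 0 + 1)) PySem.Dict.empty
  let maxc := word_count.values.foldl (fun m c => if c > m then c else m) 0
  let buckets := word_count.items.foldl
    (fun b p => b.modify p.2 [] (fun l => l ++ [p.1])) PySem.Dict.empty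
  let result := (PySem.List.pyRange maxc 0 (-1)).foldl
    (fun r c => (buckets.getD c []).foldl (fun r word => r.insert word c) r)
    PySem.Dict.empty
  result.items

-- ===== PRECONDITION & SPEC =====
def Spec_separate_and_count (sentence : String) (out : List (String × Int)) : Prop := out = separate_and_count_alt sentence
instance (sentence : String) (out : List (String × Int)) : Decidable (Spec_separate_and_count sentence out) := by unfold Spec_separate_and_count; infer_instance

-- ===== CLAIM (what is proved, stated in full; the proofs are below) =====
def Claim_equal_separate_and_count : Prop := ∀ (sentence : String), Dom_separate_and_count sentence → Spec_separate_and_count sentence (separate_and_count sentence)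

-- ===== LEMMAS AND PROOFS =====

-- insertBy inserts after the block where `before` fails and in front of the first success
theorem pv_insertBy_append {α : Type} (bef : α → α → Bool) (a : α) (L1 L2 : List α)
    (h1 : ∀ y ∈ L1, bef a y = false)
    (h2 : ∀ h t, L2 = h :: t → bef a h = true) :
    PySem.List.insertBy bef a (L1 ++ L2) = L1 ++ a :: L2 := by
  induction L1 with
  | nil =>
    cases L2 with
    | nil => simp [PySem.List.insertBy]
    | cons h t => simp [PySem.List.insertBy, h2 h t rfl]
  | cons x xs ih =>
    have hx : bef a x = false := h1 x (by simp)
    simp [PySem.List.insertBy, hx, ih (fun y hy => h1 y (by simp [hy]))]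

-- stable reverse sort = concatenation of the key-buckets, keys listed strictly decreasingly
theorem pv_sorted_rev_eq_flatMap {α : Type} (key : α → Int) (xs : List α) (ks : List Int)
    (hks : ks.Pairwise (· > ·)) (hmem : ∀ a ∈ xs, key a ∈ ks) :
    PySem.List.sorted xs key true
      = ks.flatMap (fun k => xs.filter (fun a => key a == k)) := by
  induction xs using List.reverseRecOn with
  | nil => simp [PySem.List.sorted]
  | append_singleton xs a ih =>
    have hmem' : ∀ b ∈ xs, key b ∈ ks := fun b hb => hmem b (by simp [hb])
    have hka : key a ∈ ks := hmem a (by simp)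
    obtain ⟨ks1, ks2, rfl⟩ := List.append_of_mem hka
    rw [List.pairwise_append] at hks
    obtain ⟨p1, p2, p3⟩ := hks
    rw [List.pairwise_cons] at p2
    obtain ⟨p2h, _⟩ := p2
    -- left side: one more insertBy step on top of sorted xs
    rw [PySem.List.sorted_rev_eq_foldl_insertBy, List.foldl_append, List.foldl_cons,
      List.foldl_nil, ← PySem.List.sorted_rev_eq_foldl_insertBy, ih hmem']
    -- right side: only the bucket of (key a) changes
    have hbucket : ∀ (l : List Int), (∀ k ∈ l, key a ≠ k) →
        (l.flatMap (fun k => (xs ++ [a]).filter (fun b => key b == k)))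
          = l.flatMap (fun k => xs.filter (fun b => key b == k)) := by
      intro l hl
      unfold List.flatMap
      congr 1
      apply List.map_congr_left
      intro k hk
      rw [List.filter_append]
      simp [hl k hk]
    have h1 : ∀ k ∈ ks1, key a ≠ k := by
      intro k hk he
      have := p3 k hk (key a) (List.mem_cons_self)
      omega
    have h2 : ∀ k ∈ ks2, key a ≠ k := by
      intro k hk he
      have := p2h k hk
      omega
    rw [List.flatMap_append, List.flatMap_cons, List.flatMap_append, List.flatMap_cons,
      hbucket ks1 h1, hbucket ks2 h2]
    have hk0 : (xs ++ [a]).filter (fun b => key b == key a)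
        = xs.filter (fun b => key b == key a) ++ [a] := by
      rw [List.filter_append]; simp
    rw [hk0]
    have := pv_insertBy_append (fun p q => decide (key q < key p)) a
      (ks1.flatMap (fun k => xs.filter (fun b => key b == k))
        ++ xs.filter (fun b => key b == key a))
      (ks2.flatMap (fun k => xs.filter (fun b => key b == k)))
      (by
        intro y hy
        rcases List.mem_append.1 hy with hy | hy
        · obtain ⟨k, hk, hyk⟩ := List.mem_flatMap.1 hy
          have hkey : key y = k := by simpa using (List.mem_filter.1 hyk).2
          have := p3 k hk (key a) (List.mem_cons_self)
          simp only [decide_eq_false_iff_not]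
          omega
        · have hkey : key y = key a := by simpa using (List.mem_filter.1 hy).2
          simp [hkey])
      (by
        intro h t hl
        have hh : h ∈ ks2.flatMap (fun k => xs.filter (fun b => key b == k)) := by
          rw [hl]; exact List.mem_cons_self
        obtain ⟨k, hk, hyk⟩ := List.mem_flatMap.1 hh
        have hkey : key h = k := by simpa using (List.mem_filter.1 hyk).2
        have := p2h k hk
        simp only [decide_eq_true_eq]
        omega)
    rw [← List.append_assoc, this]
    simp

-- range(m, 0, -1) in closed form, for 0 ≤ m
theorem pv_range_desc (m : Int) (hm : 0 ≤ m) :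
    PySem.List.pyRange m 0 (-1) = (List.range m.toNat).map (fun k : Nat => m - (k : Int)) := by
  simp only [PySem.List.pyRange]
  norm_num
  rcases lt_or_eq_of_le hm with h | h
  · simp only [h, if_pos]
    apply List.map_congr_left
    intro k _
    ring
  · simp [← h]

theorem pv_range_desc_pairwise (m : Int) (hm : 0 ≤ m) :
    (PySem.List.pyRange m 0 (-1)).Pairwise (· > ·) := by
  rw [pv_range_desc m hm]
  exact List.Pairwise.map _ (fun h => by omega) List.pairwise_lt_range

theorem pv_range_desc_mem (m c : Int) (hm : 0 ≤ m) (h1 : 1 ≤ c) (h2 : c ≤ m) :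
    c ∈ PySem.List.pyRange m 0 (-1) := by
  rw [pv_range_desc m hm]
  exact List.mem_map.2 ⟨(m - c).toNat, List.mem_range.2 (by omega), by omega⟩

set_option maxHeartbeats 1000000 in
theorem separate_and_count_agree (sentence : String) :
    separate_and_count sentence = separate_and_count_alt sentence := by
  simp only [separate_and_count, separate_and_count_alt]
  set W := PySem.Str.split₀ (PySem.Str.strip sentence) with hW
  clear_value W
  -- the two counting loops build the same dict, namely Counter(W)
  have hfun : (fun (d : PySem.Dict String Int) word =>
      if ¬ d.contains word then d.insert word 1 else d.insert word (d.getD word 0 + 1))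
      = (fun (d : PySem.Dict String Int) word => d.insert word (d.getD word 0 + 1)) := by
    funext d w
    by_cases h : d.contains w
    · simp [h]
    · have h' : d.contains w = false := by simpa using h
      have hg : d.getD w 0 = 0 := by simp [PySem.Dict.getD_of_not_contains, h']
      simp [h', hg]
  rw [hfun, PySem.Dict.foldl_insert_getD_add_one_eq_counter]
  set its := (PySem.Dict.counter W).items with hits
  clear_value its
  -- the max loop is a running max
  have hmaxfun : (fun (m c : Int) => if c > m then c else m) = fun m c => max m (id c) := by
    funext m c
    simp only [id, max_def]
    split_ifs <;> omega
  rw [hmaxfun]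
  set M := (PySem.Dict.counter W).values.foldl (fun m c => max m (id c)) 0 with hM
  have hMfacts := PySem.List.le_foldl_max_int (PySem.Dict.counter W).values id 0
  rw [← hM] at hMfacts
  clear_value M
  have hM0 : 0 ≤ M := hMfacts.1
  have hMle : ∀ c ∈ (PySem.Dict.counter W).values, c ≤ M := hMfacts.2
  -- every count is between 1 and M, hence a key of range(M, 0, -1)
  have hmemks : ∀ p ∈ its, p.2 ∈ PySem.List.pyRange M 0 (-1) := by
    intro p hp
    have h1 : 1 ≤ p.2 := by
      rw [hits, PySem.Dict.items_counter] at hp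
      obtain ⟨k, hk, rfl⟩ := List.mem_map.1 hp
      have : k ∈ W := (PySem.Set.mem_ofList _ _).1 hk
      have := List.count_pos_iff.2 this
      simpa using this
    have h2 : p.2 ≤ M := hMle p.2 (by
      simp only [PySem.Dict.values]
      exact List.mem_map.2 ⟨p, hits ▸ hp, rfl⟩)
    exact pv_range_desc_mem M p.2 hM0 h1 h2
  -- buckets[c] = the words whose count is c, in insertion order
  have hbget : ∀ c : Int,
      (its.foldl (fun b p => b.modify p.2 [] (fun l => l ++ [p.1])) PySem.Dict.empty).getD c []
        = (its.filter (fun p => p.2 == c)).map (·.1) := by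
    intro c
    have h1 : its.foldl (fun b p => b.modify p.2 [] (fun l => l ++ [p.1])) PySem.Dict.empty
        = (its.map (fun p => (p.2, p.1))).foldl
            (fun d q => d.modify q.1 [] (fun l => l ++ [q.2])) PySem.Dict.empty := by
      rw [List.foldl_map]
    rw [h1, PySem.Dict.getD_foldl_modify_append]
    simp [List.filter_map, Function.comp_def, List.map_map]
  -- the emission loops insert the pairs of the bucket concatenation, in order
  have hpair : ∀ (r : PySem.Dict String Int) (c : Int) (ws : List String),
      ws.foldl (fun r word => r.insert word c) r
        = (ws.map (fun w => (w, c))).foldl (fun r p => r.insert p.1 p.2) r := by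
    intro r c ws
    rw [List.foldl_map]
  simp only [hbget, hpair, ← List.foldl_flatMap]
  -- the emitted pair list is exactly the bucket concatenation of its
  have hL : (PySem.List.pyRange M 0 (-1)).flatMap
        (fun c => ((its.filter (fun p => p.2 == c)).map (·.1)).map (fun w => (w, c)))
      = (PySem.List.pyRange M 0 (-1)).flatMap (fun k => its.filter (fun p => p.2 == k)) := by
    unfold List.flatMap
    congr 1
    apply List.map_congr_left
    intro c _
    rw [List.map_map]
    calc (its.filter (fun p => p.2 == c)).map ((fun w => (w, c)) ∘ (·.1))
        = (its.filter (fun p => p.2 == c)).map id := by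
          apply List.map_congr_left
          intro p hp
          have h2 : p.2 = c := by simpa using (List.mem_filter.1 hp).2
          simp [← h2]
      _ = its.filter (fun p => p.2 == c) := List.map_id _
  rw [hL, ← pv_sorted_rev_eq_flatMap (fun p => p.2) its (PySem.List.pyRange M 0 (-1))
      (pv_range_desc_pairwise M hM0) hmemks]
  -- both sides now build a dict from the same distinct-key pair list and return its items
  simp only [PySem.Dict.ofList, PySem.Dict.update]

-- ===== VERDICT (by name: the statement is the Claim_ definition above) =====
theorem separate_and_count_spec : Claim_equal_separate_and_count := by
  intro s _
  unfold Spec_separate_and_count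
  exact separate_and_count_agree s
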